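-- pv_equiv track=rewrite | github.com/radroof22/persona-steering-for-agents | query_answerer.py | _format_query_for_t5
-- ===== SOURCE A (Python) =====
-- def _format_query_for_t5(query: str) -> str:
--     """
--     Format the query for T5 model input
--
--     Args:
--         query: Original query
--
--     Returns:
--         Formatted query for T5
--     """
--     # T5 uses task prefixes. For question answering, we can use "question:"
--     formatted_query = f"question: {query}"
--
--     # Add context if it's a specific type of question
--     query_lower = query.lower()
--
--     if any(word in query_lower for word in ['what is', 'what are', 'define', 'explain']):
--         formatted_query = f"explain: {query}"
--     elif any(word in query_lower for word in ['how to', 'how do', 'steps', 'process']):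
--         formatted_query = f"how to: {query}"
--     elif any(word in query_lower for word in ['why', 'reason', 'cause']):
--         formatted_query = f"why: {query}"
--     elif any(word in query_lower for word in ['when', 'time', 'date']):
--         formatted_query = f"when: {query}"
--     elif any(word in query_lower for word in ['where', 'location', 'place']):
--         formatted_query = f"where: {query}"
--     elif any(word in query_lower for word in ['who', 'person', 'people']):
--         formatted_query = f"who: {query}"
--
--     return formatted_query
-- ===== SOURCE B (Python) =====
-- # Flat keyword -> priority-rank map; a single running-minimum pass picks the
-- # best (lowest-rank) category, then the prefix is looked up in a table.
-- _KEYWORD_RANK = {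
--     'what is': 0, 'what are': 0, 'define': 0, 'explain': 0,
--     'how to': 1, 'how do': 1, 'steps': 1, 'process': 1,
--     'why': 2, 'reason': 2, 'cause': 2,
--     'when': 3, 'time': 3, 'date': 3,
--     'where': 4, 'location': 4, 'place': 4,
--     'who': 5, 'person': 5, 'people': 5,
-- }
-- _PREFIXES = ['explain', 'how to', 'why', 'when', 'where', 'who', 'question']
--
--
-- def _format_query_for_t5(query: str) -> str:
--     query_lower = query.lower()
--     best = 6
--     for word, rank in _KEYWORD_RANK.items():
--         if word in query_lower and rank < best:
--             best = rank
--     return f"{_PREFIXES[best]}: {query}"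
-- ===== Notes on version B (the rewrite author's own statement) =====
-- stated objective: alternative
-- what changed: Replaces the six-branch if/elif chain of per-category any() tests by a flat keyword-to-priority-rank map scanned once with a running-minimum accumulator; the winning rank indexes a prefix table (with 'question' as the sentinel rank).
import Mathlib
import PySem

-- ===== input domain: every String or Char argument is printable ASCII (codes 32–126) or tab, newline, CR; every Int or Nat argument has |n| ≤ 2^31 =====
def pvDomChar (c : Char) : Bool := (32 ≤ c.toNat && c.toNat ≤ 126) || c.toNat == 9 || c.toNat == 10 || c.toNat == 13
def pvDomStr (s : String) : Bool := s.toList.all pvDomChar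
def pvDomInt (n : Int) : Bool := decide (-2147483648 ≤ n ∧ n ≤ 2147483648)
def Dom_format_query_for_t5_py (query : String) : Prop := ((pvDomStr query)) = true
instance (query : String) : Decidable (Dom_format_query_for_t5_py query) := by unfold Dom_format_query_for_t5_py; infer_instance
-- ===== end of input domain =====

-- B replaces A's if/elif chain by a flat keyword->rank map scanned with a running minimum (alternative decomposition; same cost).


-- ===== PORT A =====
-- Port of A: if/elif chain, one branch per prefix, overwriting the default.
def format_query_for_t5_py (query : String) : String :=
  let formatted_query := "question: " ++ query
  let query_lower := PySem.Str.lower query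
  if ["what is", "what are", "define", "explain"].any (fun w => PySem.Str.isIn w query_lower) then
    "explain: " ++ query
  else if ["how to", "how do", "steps", "process"].any (fun w => PySem.Str.isIn w query_lower) then
    "how to: " ++ query
  else if ["why", "reason", "cause"].any (fun w => PySem.Str.isIn w query_lower) then
    "why: " ++ query
  else if ["when", "time", "date"].any (fun w => PySem.Str.isIn w query_lower) then
    "when: " ++ query
  else if ["where", "location", "place"].any (fun w => PySem.Str.isIn w query_lower) then
    "where: " ++ query
  else if ["who", "person", "people"].any (fun w => PySem.Str.isIn w query_lower) then
    "who: " ++ query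
  else formatted_query

-- ===== PORT B =====
-- B: flat keyword -> rank map; one running-minimum pass; the winning rank indexes a prefix table.
def pvKeywordRank : List (String × Nat) :=
  [("what is", 0), ("what are", 0), ("define", 0), ("explain", 0),
   ("how to", 1), ("how do", 1), ("steps", 1), ("process", 1),
   ("why", 2), ("reason", 2), ("cause", 2),
   ("when", 3), ("time", 3), ("date", 3),
   ("where", 4), ("location", 4), ("place", 4),
   ("who", 5), ("person", 5), ("people", 5)]

def pvPrefixes : List String :=
  ["explain", "how to", "why", "when", "where", "who", "question"]

def format_query_for_t5_py_alt (query : String) : String :=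
  let query_lower := PySem.Str.lower query
  let best := pvKeywordRank.foldl
    (fun best p => if PySem.Str.isIn p.1 query_lower && decide (p.2 < best) then p.2 else best) 6
  pvPrefixes.getD best "" ++ ": " ++ query

-- ===== PRECONDITION & SPEC =====
def Spec_format_query_for_t5_py (query : String) (out : String) : Prop := out = format_query_for_t5_py_alt query
instance (query : String) (out : String) : Decidable (Spec_format_query_for_t5_py query out) := by unfold Spec_format_query_for_t5_py; infer_instance

-- ===== CLAIM (what is proved, stated in full; the proofs are below) =====
def Claim_equal_format_query_for_t5_py : Prop := ∀ (query : String), Dom_format_query_for_t5_py query → Spec_format_query_for_t5_py query (format_query_for_t5_py query)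

-- ===== LEMMAS AND PROOFS =====

-- fold of the running-minimum step over a chunk whose ranks are all k
theorem pv_chunk (ql : String) (k acc : Nat) (l : List (String × Nat))
    (hl : ∀ p ∈ l, p.2 = k) :
    l.foldl (fun best p => if PySem.Str.isIn p.1 ql && decide (p.2 < best) then p.2 else best) acc
      = if l.any (fun p => PySem.Str.isIn p.1 ql) && decide (k < acc) then k else acc := by
  induction l generalizing acc with
  | nil => simp
  | cons x xs ih =>
    obtain ⟨w, r⟩ := x
    have hr : r = k := hl (w, r) (List.mem_cons_self ..)
    subst hr
    have ih' := fun acc => ih acc (fun p hp => hl p (List.mem_cons_of_mem _ hp))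
    rw [List.foldl_cons, List.any_cons]
    by_cases hin : PySem.Str.isIn w ql = true
    · by_cases hlt : r < acc
      · simp_all
      · have d : decide (r < acc) = false := decide_eq_false hlt
        simp only [hin, d, Bool.and_false, Bool.true_or, Bool.false_eq_true,
          if_false, ih' acc]
    · simp only [Bool.not_eq_true] at hin
      simp only [hin, Bool.false_and, Bool.false_or, Bool.false_eq_true, if_false, ih' acc]

-- the whole fold in terms of the six per-category "any" tests
set_option maxHeartbeats 2000000 in
theorem pv_fold_char (ql : String) :
    pvKeywordRank.foldl
      (fun best p => if PySem.Str.isIn p.1 ql && decide (p.2 < best) then p.2 else best) 6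
    = (if [("what is",(0:Nat)), ("what are",0), ("define",0), ("explain",0)].any (fun p => PySem.Str.isIn p.1 ql) then 0
       else if [("how to",(1:Nat)), ("how do",1), ("steps",1), ("process",1)].any (fun p => PySem.Str.isIn p.1 ql) then 1
       else if [("why",(2:Nat)), ("reason",2), ("cause",2)].any (fun p => PySem.Str.isIn p.1 ql) then 2
       else if [("when",(3:Nat)), ("time",3), ("date",3)].any (fun p => PySem.Str.isIn p.1 ql) then 3
       else if [("where",(4:Nat)), ("location",4), ("place",4)].any (fun p => PySem.Str.isIn p.1 ql) then 4
       else if [("who",(5:Nat)), ("person",5), ("people",5)].any (fun p => PySem.Str.isIn p.1 ql) then 5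
       else 6) := by
  have e : pvKeywordRank =
      [("what is",(0:Nat)), ("what are",0), ("define",0), ("explain",0)]
      ++ ([("how to",1), ("how do",1), ("steps",1), ("process",1)]
      ++ ([("why",2), ("reason",2), ("cause",2)]
      ++ ([("when",3), ("time",3), ("date",3)]
      ++ ([("where",4), ("location",4), ("place",4)]
      ++ [("who",5), ("person",5), ("people",5)])))) := rfl
  rw [e, List.foldl_append, List.foldl_append, List.foldl_append, List.foldl_append,
      List.foldl_append]
  rw [pv_chunk ql 0 6 [("what is",0), ("what are",0), ("define",0), ("explain",0)] (by decide)]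
  rw [pv_chunk ql 1 _ [("how to",1), ("how do",1), ("steps",1), ("process",1)] (by decide)]
  rw [pv_chunk ql 2 _ [("why",2), ("reason",2), ("cause",2)] (by decide)]
  rw [pv_chunk ql 3 _ [("when",3), ("time",3), ("date",3)] (by decide)]
  rw [pv_chunk ql 4 _ [("where",4), ("location",4), ("place",4)] (by decide)]
  rw [pv_chunk ql 5 _ [("who",5), ("person",5), ("people",5)] (by decide)]
  split_ifs <;> simp_all

-- ===== VERDICT (by name: the statement is the Claim_ definition above) =====
theorem format_query_for_t5_py_spec : Claim_equal_format_query_for_t5_py := by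
  intro query _
  unfold Spec_format_query_for_t5_py
  show format_query_for_t5_py query = format_query_for_t5_py_alt query
  unfold format_query_for_t5_py format_query_for_t5_py_alt
  simp only []
  rw [pv_fold_char (PySem.Str.lower query)]
  simp only [List.any_cons, List.any_nil, Bool.or_false]
  split_ifs <;> rfl
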